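-- pv_equiv track=rewrite | github.com/spaghettiwoahs/terminalrogue | pyside6_ui.py | filter_completion_matches
-- ===== SOURCE A (Python) =====
-- def filter_completion_matches(candidates, prefix: str):
--     lowered_prefix = (prefix or "").lower()
--     seen = set()
--     matches = []
--     for candidate in candidates:
--         if not candidate:
--             continue
--         if candidate in seen:
--             continue
--         if lowered_prefix and not str(candidate).lower().startswith(lowered_prefix):
--             continue
--         seen.add(candidate)
--         matches.append(candidate)
--     exact = lowered_prefix
--     return sorted(matches, key=lambda value: (str(value).lower() != exact, str(value).lower()))
-- ===== SOURCE B (Python) =====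
-- def filter_completion_matches(candidates, prefix: str):
--     lowered = (prefix or "").lower()
--     present = set()
--     result = []  # (key, candidate) pairs, kept sorted by key at all times
--     for c in candidates:
--         if not c:
--             continue
--         if c in present:
--             continue
--         low = str(c).lower()
--         if lowered and not low.startswith(lowered):
--             continue
--         present.add(c)
--         key = (low != lowered, low)
--         i = 0
--         while i < len(result) and result[i][0] <= key:
--             i += 1
--         result.insert(i, (key, c))
--     return [c for _, c in result]
-- ===== Notes on version B (the rewrite author's own statement) =====
-- stated objective: alternative
-- what changed: Replaces A's collect-then-sorted() pipeline with a single online pass that keeps the output sorted at all times: each surviving candidate is inserted at its sorted position (after all keys <= its (non-exact, lowercase) key) as it is encountered, so no final sort exists.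
import Mathlib
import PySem

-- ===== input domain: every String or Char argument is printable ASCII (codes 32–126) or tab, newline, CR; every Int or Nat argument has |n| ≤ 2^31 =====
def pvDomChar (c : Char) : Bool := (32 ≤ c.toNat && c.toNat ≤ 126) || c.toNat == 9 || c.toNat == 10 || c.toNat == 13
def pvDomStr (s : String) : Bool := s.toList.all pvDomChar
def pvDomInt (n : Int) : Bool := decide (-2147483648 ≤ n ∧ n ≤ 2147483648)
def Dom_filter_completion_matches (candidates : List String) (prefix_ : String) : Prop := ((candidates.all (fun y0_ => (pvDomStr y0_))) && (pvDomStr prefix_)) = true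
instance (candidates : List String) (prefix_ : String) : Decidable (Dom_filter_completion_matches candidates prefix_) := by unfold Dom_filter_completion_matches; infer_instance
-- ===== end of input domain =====

-- B replaces A's collect-then-sorted() pipeline by one online pass that inserts each surviving
-- candidate at its sorted position in the accumulator, so no final sort exists; alternative decomposition, same result.

-- ===== PORT A =====
-- the body of A's for-loop (state = (seen, matches))
def stepA (lowered : String) (st : List String × List String) (c : String) : List String × List String :=
  if c = "" then st
  else if PySem.Set.contains st.1 c then st
  else if lowered ≠ "" ∧ ¬ PySem.Str.startswith (PySem.Str.lower c) lowered then st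
  else (PySem.Set.add st.1 c, st.2 ++ [c])

def filter_completion_matches (candidates : List String) (prefix_ : String) : List String :=
  let lowered := PySem.Str.lower prefix_
  let st := candidates.foldl (stepA lowered) ((PySem.Set.empty : PySem.Set String), ([] : List String))
  PySem.List.sorted2 st.2
    (fun v => if PySem.Str.lower v = lowered then (0 : Nat) else 1)
    (fun v => PySem.Str.lower v) false

-- ===== PORT B =====
-- Python tuple key (low != lowered, low), bool ported as Nat 0/1; keyLE is Python's tuple <=
def keyOf (lowered c : String) : Nat × String :=
  (if PySem.Str.lower c = lowered then 0 else 1, PySem.Str.lower c)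

def keyLE (a b : Nat × String) : Bool :=
  decide (a.1 < b.1) || (decide (a.1 = b.1) && !decide (b.2 < a.2))

-- B's while loop: advance past every pair whose key is <= key, insert (key, c) there
def insLoop (key : Nat × String) (kc : (Nat × String) × String) :
    List ((Nat × String) × String) → List ((Nat × String) × String)
  | [] => [kc]
  | p :: rest => if keyLE p.1 key then p :: insLoop key kc rest else kc :: p :: rest

-- the body of B's for-loop (state = (present, result))
def stepB (lowered : String) (st : List String × List ((Nat × String) × String)) (c : String) :
    List String × List ((Nat × String) × String) :=
  if c = "" then st
  else if PySem.Set.contains st.1 c then st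
  else if lowered ≠ "" ∧ ¬ PySem.Str.startswith (PySem.Str.lower c) lowered then st
  else
    let key := keyOf lowered c
    (PySem.Set.add st.1 c, insLoop key (key, c) st.2)

def filter_completion_matches_alt (candidates : List String) (prefix_ : String) : List String :=
  let lowered := PySem.Str.lower prefix_
  let st := candidates.foldl (stepB lowered) ((PySem.Set.empty : PySem.Set String), ([] : List ((Nat × String) × String)))
  st.2.map Prod.snd

-- ===== PRECONDITION & SPEC =====
def Spec_filter_completion_matches (candidates : List String) (prefix_ : String) (out : List String) : Prop := out = filter_completion_matches_alt candidates prefix_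
instance (candidates : List String) (prefix_ : String) (out : List String) : Decidable (Spec_filter_completion_matches candidates prefix_ out) := by unfold Spec_filter_completion_matches; infer_instance

-- ===== CLAIM (what is proved, stated in full; the proofs are below) =====
def Claim_equal_filter_completion_matches : Prop := ∀ (candidates : List String) (prefix_ : String), Dom_filter_completion_matches candidates prefix_ → Spec_filter_completion_matches candidates prefix_ (filter_completion_matches candidates prefix_)

-- ===== LEMMAS AND PROOFS =====

-- comparator used by sorted2 in port A
def lt2 (lowered : String) (a b : String) : Bool :=
  decide ((if PySem.Str.lower a = lowered then (0 : Nat) else 1) < (if PySem.Str.lower b = lowered then (0 : Nat) else 1))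
    || (!decide ((if PySem.Str.lower b = lowered then (0 : Nat) else 1) < (if PySem.Str.lower a = lowered then (0 : Nat) else 1))
        && decide (PySem.Str.lower a < PySem.Str.lower b))

-- the two comparators decide the same insertion point
theorem keyLE_not_iff_lt2 (lowered c b : String) :
    (!keyLE (keyOf lowered b) (keyOf lowered c)) = lt2 lowered c b := by
  by_cases hc : PySem.Str.lower c = lowered <;> by_cases hb : PySem.Str.lower b = lowered <;>
    simp [keyOf, keyLE, lt2, hc, hb]

theorem insLoop_snd (lowered c : String) (r : List ((Nat × String) × String))
    (hr : ∀ p ∈ r, p.1 = keyOf lowered p.2) :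
    (insLoop (keyOf lowered c) (keyOf lowered c, c) r).map Prod.snd
      = PySem.List.insertBy (lt2 lowered) c (r.map Prod.snd) := by
  induction r with
  | nil => rfl
  | cons p rest ih =>
    have hp : p.1 = keyOf lowered p.2 := hr p (by simp)
    have hc := keyLE_not_iff_lt2 lowered c p.2
    simp only [insLoop, hp, List.map_cons, PySem.List.insertBy]
    by_cases h : keyLE (keyOf lowered p.2) (keyOf lowered c) = true
    · have : lt2 lowered c p.2 = false := by rw [← hc, h]; rfl
      simp [h, this, ih (fun q hq => hr q (by simp [hq]))]
    · have hf : keyLE (keyOf lowered p.2) (keyOf lowered c) = false := by simpa using h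
      have : lt2 lowered c p.2 = true := by rw [← hc, hf]; rfl
      simp [hf, this]

theorem mem_insLoop (key : Nat × String) (kc : (Nat × String) × String) :
    ∀ (r : List ((Nat × String) × String)) (p : (Nat × String) × String),
    p ∈ insLoop key kc r → p = kc ∨ p ∈ r := by
  intro r
  induction r with
  | nil =>
    intro p hp
    simp only [insLoop, List.mem_singleton] at hp
    exact Or.inl hp
  | cons q rest ih =>
    intro p hp
    simp only [insLoop] at hp
    by_cases h : keyLE q.1 key = true
    · rw [if_pos h] at hp
      rcases List.mem_cons.mp hp with h1 | h1
      · exact Or.inr (by simp [h1])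
      · rcases ih p h1 with h2 | h2
        · exact Or.inl h2
        · exact Or.inr (by simp [h2])
    · rw [if_neg h] at hp
      rcases List.mem_cons.mp hp with h1 | h1
      · exact Or.inl h1
      · exact Or.inr h1

theorem insLoop_inv (lowered c : String) (r : List ((Nat × String) × String))
    (hr : ∀ p ∈ r, p.1 = keyOf lowered p.2) :
    ∀ p ∈ insLoop (keyOf lowered c) (keyOf lowered c, c) r, p.1 = keyOf lowered p.2 := by
  intro p hp
  rcases mem_insLoop (keyOf lowered c) (keyOf lowered c, c) r p hp with h | h
  · subst h; rfl
  · exact hr p h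

-- folding B's online insertion = folding A's sort insertion, through map snd
theorem foldl_insLoop_snd (lowered : String) (t : List String) :
    ∀ (r : List ((Nat × String) × String)), (∀ p ∈ r, p.1 = keyOf lowered p.2) →
    (t.foldl (fun acc x => insLoop (keyOf lowered x) (keyOf lowered x, x) acc) r).map Prod.snd
      = t.foldl (fun acc x => PySem.List.insertBy (lt2 lowered) x acc) (r.map Prod.snd) := by
  induction t with
  | nil => intro r _; rfl
  | cons x t ih =>
    intro r hr
    simp only [List.foldl_cons]
    rw [ih _ (insLoop_inv lowered x r hr), insLoop_snd lowered x r hr]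

-- the two loops accept the same candidates in the same order: A appends them, B inserts them sorted
theorem loopAB (lowered : String) (l : List String) :
    ∀ (s accA : List String) (r : List ((Nat × String) × String)),
    ∃ t, l.foldl (stepA lowered) (s, accA) = (s ++ t, accA ++ t)
       ∧ l.foldl (stepB lowered) (s, r)
           = (s ++ t, t.foldl (fun acc x => insLoop (keyOf lowered x) (keyOf lowered x, x) acc) r) := by
  induction l with
  | nil => intro s accA r; exact ⟨[], by simp, by simp⟩
  | cons c l ih =>
    intro s accA r
    by_cases h0 : c = ""
    · have hA : stepA lowered (s, accA) c = (s, accA) := by simp [stepA, h0]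
      have hB : stepB lowered (s, r) c = (s, r) := by simp [stepB, h0]
      simpa [hA, hB] using ih s accA r
    · by_cases hc : c ∈ s
      · have hA : stepA lowered (s, accA) c = (s, accA) := by simp [stepA, h0, hc]
        have hB : stepB lowered (s, r) c = (s, r) := by simp [stepB, h0, hc]
        simpa [hA, hB] using ih s accA r
      · by_cases hl : lowered = ""
        · have hA : stepA lowered (s, accA) c = (s ++ [c], accA ++ [c]) := by
            simp [stepA, h0, hc, hl]
          have hB : stepB lowered (s, r) c
              = (s ++ [c], insLoop (keyOf lowered c) (keyOf lowered c, c) r) := by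
            simp [stepB, h0, hc, hl]
          obtain ⟨t, h1, h2⟩ := ih (s ++ [c]) (accA ++ [c]) (insLoop (keyOf lowered c) (keyOf lowered c, c) r)
          refine ⟨c :: t, ?_, ?_⟩
          · rw [List.foldl_cons, hA, h1]; simp
          · rw [List.foldl_cons, hB, h2]; simp
        · by_cases hst : PySem.Chars.startswith (PySem.Chars.lower c.toList) lowered.toList = true
          · have hA : stepA lowered (s, accA) c = (s ++ [c], accA ++ [c]) := by
              simp [stepA, h0, hc, hl, hst, PySem.Str.startswith, PySem.Str.lower]
            have hB : stepB lowered (s, r) c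
                = (s ++ [c], insLoop (keyOf lowered c) (keyOf lowered c, c) r) := by
              simp [stepB, h0, hc, hl, hst, PySem.Str.startswith, PySem.Str.lower]
            obtain ⟨t, h1, h2⟩ := ih (s ++ [c]) (accA ++ [c]) (insLoop (keyOf lowered c) (keyOf lowered c, c) r)
            refine ⟨c :: t, ?_, ?_⟩
            · rw [List.foldl_cons, hA, h1]; simp
            · rw [List.foldl_cons, hB, h2]; simp
          · have hA : stepA lowered (s, accA) c = (s, accA) := by
              simp [stepA, h0, hc, hl, hst, PySem.Str.startswith, PySem.Str.lower]
            have hB : stepB lowered (s, r) c = (s, r) := by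
              simp [stepB, h0, hc, hl, hst, PySem.Str.startswith, PySem.Str.lower]
            simpa [hA, hB] using ih s accA r

-- ===== VERDICT (by name: the statement is the Claim_ definition above) =====
theorem filter_completion_matches_spec : Claim_equal_filter_completion_matches := by
  intro candidates prefix_ _
  unfold Spec_filter_completion_matches filter_completion_matches filter_completion_matches_alt
  set lowered := PySem.Str.lower prefix_ with hlow
  obtain ⟨t, h1, h2⟩ := loopAB lowered candidates [] [] []
  have e1 : ∀ (M : List String),
      PySem.List.sorted2 M (fun v => if PySem.Str.lower v = lowered then (0 : Nat) else 1)
          (fun v => PySem.Str.lower v) false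
        = M.foldl (fun acc x => PySem.List.insertBy (lt2 lowered) x acc) [] := fun M => rfl
  have hA : (candidates.foldl (stepA lowered) ((PySem.Set.empty : PySem.Set String), ([] : List String))).2 = t := by
    have : candidates.foldl (stepA lowered) (([] : List String), ([] : List String)) = ([] ++ t, [] ++ t) := h1
    simp [PySem.Set.empty, this]
  have hB : (candidates.foldl (stepB lowered) ((PySem.Set.empty : PySem.Set String), ([] : List ((Nat × String) × String)))).2
      = t.foldl (fun acc x => insLoop (keyOf lowered x) (keyOf lowered x, x) acc) [] := by
    have : candidates.foldl (stepB lowered) (([] : List String), ([] : List ((Nat × String) × String)))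
        = ([] ++ t, t.foldl (fun acc x => insLoop (keyOf lowered x) (keyOf lowered x, x) acc) []) := h2
    simp [PySem.Set.empty, this]
  simp only [hA, hB, e1]
  rw [foldl_insLoop_snd lowered t [] (by simp)]
  rfl
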